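-- pv_equiv track=rewrite | github.com/dev-mbusch/adventofcode2015 | day05_nice_string.py | check_for_palindrom
-- ===== SOURCE A (Python) =====
-- def check_for_palindrom(input_str):
--     preprecessor = ''
--     precessor = ''
--
--     for char in input_str:
--         if char == preprecessor:
--             return True
--             break
--         else:
--             preprecessor = precessor
--             precessor = char
--
--     return False
-- ===== SOURCE B (Python) =====
-- def check_for_palindrom(input_str):
--     # index the string: for each character, the set of positions where it occurs;
--     # then a character repeats with one letter in between iff some character
--     # occurs at two positions exactly 2 apart.
--     positions = {}
--     for index, char in enumerate(input_str):
--         positions.setdefault(char, set()).add(index)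
--     return any(index + 2 in indices
--                for indices in positions.values()
--                for index in indices)
-- ===== Notes on version B (the rewrite author's own statement) =====
-- stated objective: alternative
-- what changed: Replaced the single-pass sliding-window scan (two shadow variables, early return) by a two-phase algorithm: first build a hash index mapping each character to the set of its positions, then ask whether any character occupies two positions exactly 2 apart.
import Mathlib
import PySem

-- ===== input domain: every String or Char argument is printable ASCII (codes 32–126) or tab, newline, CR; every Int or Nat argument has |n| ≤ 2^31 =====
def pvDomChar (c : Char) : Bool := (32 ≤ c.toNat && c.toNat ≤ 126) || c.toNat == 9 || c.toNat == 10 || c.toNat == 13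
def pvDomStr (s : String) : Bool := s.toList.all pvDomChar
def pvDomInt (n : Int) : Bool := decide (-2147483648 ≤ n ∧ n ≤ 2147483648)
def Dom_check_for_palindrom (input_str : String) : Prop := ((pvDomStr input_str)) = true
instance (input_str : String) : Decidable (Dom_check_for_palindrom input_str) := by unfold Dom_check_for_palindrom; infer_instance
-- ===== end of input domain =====

-- B replaces A's one-pass sliding-window scan by a two-phase algorithm: build an index
-- from each character to the set of positions where it occurs, then test whether some
-- character occupies two positions exactly 2 apart (objective: alternative).

-- ===== PORT A =====
-- A's loop with early return, carried as structural recursion over the characters with the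
-- two shadow variables as state; Python's empty-string initial values '' never compare equal
-- to a one-character string, encoded exactly as Option Char with none for ''.
def checkGoA : Option Char → Option Char → List Char → Bool
  | _, _, [] => false
  | p2, p1, c :: rest => if some c = p2 then true else checkGoA p1 (some c) rest

def check_for_palindrom (input_str : String) : Bool :=
  checkGoA none none input_str.toList

-- ===== PORT B =====
-- positions.setdefault(char, set()).add(index)  is  Dict.modify char [] (Set.add · index)
def check_for_palindrom_alt (input_str : String) : Bool :=
  let positions : PySem.Dict Char (PySem.Set Int) :=
    (PySem.List.enumerate input_str.toList 0).foldl
      (fun d p => d.modify p.2 [] (fun s => PySem.Set.add s p.1)) PySem.Dict.empty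
  positions.values.any (fun indices =>
    indices.any (fun index => PySem.Set.contains indices (index + 2)))

-- ===== PRECONDITION & SPEC =====
def Spec_check_for_palindrom (input_str : String) (out : Bool) : Prop := out = check_for_palindrom_alt input_str
instance (input_str : String) (out : Bool) : Decidable (Spec_check_for_palindrom input_str out) := by unfold Spec_check_for_palindrom; infer_instance

-- ===== CLAIM =====
def Claim_equal_check_for_palindrom : Prop := ∀ (input_str : String), Dom_check_for_palindrom input_str → Spec_check_for_palindrom input_str (check_for_palindrom input_str)

-- ===== LEMMAS AND PROOFS =====
-- membership in the position index: i is recorded under c iff the pair (i, c) occurs in the list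
theorem mem_posIndex (l : List (Int × Char)) (d : PySem.Dict Char (PySem.Set Int)) (i : Int) (c : Char) :
    i ∈ (l.foldl (fun d p => d.modify p.2 [] (fun s => PySem.Set.add s p.1)) d).getD c []
      ↔ i ∈ d.getD c [] ∨ (i, c) ∈ l := by
  induction l generalizing d with
  | nil => simp
  | cons p rest ih =>
    obtain ⟨a, b⟩ := p
    simp only [List.foldl_cons, ih, List.mem_cons, Prod.mk.injEq]
    rw [PySem.Dict.getD_modify]
    by_cases hc : c = b
    · subst hc
      rw [if_pos rfl, PySem.Set.mem_add]
      tauto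
    · rw [if_neg hc]
      tauto

theorem mem_enumerate (cs : List Char) (s i : Int) (c : Char) :
    (i, c) ∈ PySem.List.enumerate cs s ↔ ∃ k : Nat, ∃ h : k < cs.length, i = s + k ∧ cs[k] = c := by
  induction cs generalizing s with
  | nil => simp [PySem.List.enumerate_nil]
  | cons x xs ih =>
    rw [PySem.List.enumerate_cons, List.mem_cons, ih]
    constructor
    · rintro (h | ⟨k, hk, hik, hck⟩)
      · have h' : i = s ∧ c = x := by simpa [Prod.ext_iff] using h
        exact ⟨0, by simp, by simp [h'.1], h'.2.symm⟩
      · exact ⟨k + 1, by simpa using Nat.succ_lt_succ hk, by push_cast at hik ⊢; omega, by simpa using hck⟩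
    · rintro ⟨k, hk, hik, hck⟩
      cases k with
      | zero => exact Or.inl (by simp at hik hck; simp [hik, hck.symm])
      | succ k =>
        exact Or.inr ⟨k, by simpa using Nat.lt_of_succ_lt_succ hk, by push_cast at hik ⊢; omega, by simpa using hck⟩

theorem checkGoA_some (xs : List Char) : ∀ a b : Char,
    (checkGoA (some a) (some b) xs = true
      ↔ ∃ k : Nat, ∃ h : k + 2 < (a :: b :: xs).length, (a :: b :: xs)[k] = (a :: b :: xs)[k + 2]) := by
  induction xs with
  | nil => intro a b; simp [checkGoA]
  | cons c rest ih =>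
    intro a b
    simp only [checkGoA]
    by_cases hca : c = a
    · subst hca
      constructor
      · intro _; exact ⟨0, by simp, by simp⟩
      · intro _; simp
    · rw [if_neg (by simpa using hca), ih b c]
      constructor
      · rintro ⟨k, h, hk⟩
        exact ⟨k + 1, by simpa using h, by simpa using hk⟩
      · rintro ⟨k, h, hk⟩
        cases k with
        | zero => exact absurd (by simpa using hk.symm) hca
        | succ k => exact ⟨k, by simpa using h, by simpa using hk⟩

theorem A_true_iff (cs : List Char) :
    checkGoA none none cs = true ↔ ∃ k : Nat, ∃ h : k + 2 < cs.length, cs[k] = cs[k + 2] := by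
  match cs with
  | [] => simp [checkGoA]
  | [c] => simp [checkGoA]
  | a :: b :: rest =>
    have : checkGoA none none (a :: b :: rest) = checkGoA (some a) (some b) rest := by
      simp [checkGoA]
    rw [this, checkGoA_some rest a b]

theorem B_true_iff (s : String) :
    check_for_palindrom_alt s = true ↔
      ∃ i : Int, ∃ c : Char, (i, c) ∈ PySem.List.enumerate s.toList 0 ∧ (i + 2, c) ∈ PySem.List.enumerate s.toList 0 := by
  unfold check_for_palindrom_alt
  set l := PySem.List.enumerate s.toList 0 with hl
  set d := l.foldl (fun d p => d.modify p.2 [] (fun s => PySem.Set.add s p.1)) PySem.Dict.empty with hd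
  have hnd : d.keys.Nodup := by
    rw [hd]
    exact PySem.Dict.nodup_keys_foldl_modify_key l Prod.snd [] (fun d p => fun s => PySem.Set.add s p.1) PySem.Dict.empty (by simp)
  have hkeys : d.keys = PySem.Set.ofList (l.map Prod.snd) := by
    rw [hd, PySem.Dict.keys_foldl_modify_key, PySem.Dict.keys_empty, PySem.Set.update_nil_left]
  have hmem : ∀ (i : Int) (c : Char), i ∈ d.getD c [] ↔ (i, c) ∈ l := by
    intro i c
    rw [hd, mem_posIndex]
    simp
  show (d.values.any fun indices => List.any indices fun index => indices.contains (index + 2)) = true ↔ _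
  rw [PySem.Dict.values_eq_map_keys d hnd []]
  simp only [List.any_map, List.any_eq_true, Function.comp]
  constructor
  · rintro ⟨c, hc, i, hi, hcon⟩
    exact ⟨i, c, (hmem i c).1 hi, (hmem _ c).1 (by simpa using hcon)⟩
  · rintro ⟨i, c, h1, h2⟩
    refine ⟨c, ?_, i, (hmem i c).2 h1, ?_⟩
    · rw [hkeys, PySem.Set.mem_ofList]
      exact List.mem_map_of_mem h1
    · simpa using (hmem _ c).2 h2

-- ===== VERDICT =====
theorem check_for_palindrom_spec : Claim_equal_check_for_palindrom := by
  intro s _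
  unfold Spec_check_for_palindrom
  have hA := A_true_iff s.toList
  have hB := B_true_iff s
  rw [Bool.eq_iff_iff, check_for_palindrom, hA, hB]
  constructor
  · rintro ⟨k, h, hk⟩
    refine ⟨(k : Int), s.toList[k], ?_, ?_⟩
    · exact (mem_enumerate _ 0 _ _).2 ⟨k, by omega, by simp, rfl⟩
    · exact (mem_enumerate _ 0 _ _).2 ⟨k + 2, h, by push_cast; ring, hk.symm⟩
  · rintro ⟨i, c, h1, h2⟩
    obtain ⟨k, hk, hik, hck⟩ := (mem_enumerate _ 0 _ _).1 h1
    obtain ⟨k', hk', hik', hck'⟩ := (mem_enumerate _ 0 _ _).1 h2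
    have : k' = k + 2 := by omega
    subst this
    exact ⟨k, hk', by rw [hck, hck']⟩
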